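-- pv_equiv track=rewrite | github.com/SteveWillowby/Link_Prediction_Limits | hopeful_canonicalizer.py | shatter_coloring
-- ===== SOURCE A (Python) =====
-- def shatter_coloring(coloring_list, partial_coloring_dict, color_to_nodes=None):
--     new_col_types_by_old = {}
--     compute_ctn = color_to_nodes is None
--     if color_to_nodes is None:
--         color_to_nodes = {}
--
--     new_colors = []
--     for n in range(0, len(coloring_list)):
--         if n in partial_coloring_dict:
--             new_colors.append(((coloring_list[n], partial_coloring_dict[n]), n))
--         else:
--             new_colors.append(((coloring_list[n], ), n))
--
--         old_c = coloring_list[n]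
--         if old_c not in new_col_types_by_old:
--             new_col_types_by_old[old_c] = set()
--         new_col_types_by_old[old_c].add(new_colors[-1][0])
--
--         if compute_ctn:
--             if old_c not in color_to_nodes:
--                 color_to_nodes[old_c] = []
--             color_to_nodes[old_c].append(n)
--
--     new_colors.sort()
--
--     prev_color = None
--     next_i = -1
--     for (new_color, n) in new_colors:
--         if prev_color is None or new_color != prev_color:
--             next_i += 1
--
--         coloring_list[n] = next_i
--
--         prev_color = new_color
--
--     changed_nodes = []
--     for old_color, nodes in color_to_nodes.items():
--         if len(new_col_types_by_old[old_color]) > 1: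
--             changed_nodes += nodes
--
--     return changed_nodes
-- ===== SOURCE B (Python) =====
-- def shatter_coloring(coloring_list, partial_coloring_dict, color_to_nodes=None):
--     # Invert the refinement: partition the nodes by compound color, then an old
--     # color changed iff it owns more than one cell of that partition.
--     refined = {}   # compound color -> its nodes, in first-seen order
--     groups = {}    # old color -> its nodes (only built when color_to_nodes is None)
--     for n, old_c in enumerate(coloring_list):
--         cc = (old_c, partial_coloring_dict[n]) if n in partial_coloring_dict else (old_c,)
--         refined.setdefault(cc, []).append(n)
--         if color_to_nodes is None:
--             groups.setdefault(old_c, []).append(n)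
--
--     # number of compound classes owned by each old color
--     classes_per_color = {}
--     for cc in refined:
--         classes_per_color[cc[0]] = classes_per_color.get(cc[0], 0) + 1
--
--     # recolor in place, one partition cell at a time
--     for i, cc in enumerate(sorted(refined)):
--         for n in refined[cc]:
--             coloring_list[n] = i
--
--     items = groups.items() if color_to_nodes is None else color_to_nodes.items()
--     changed_nodes = []
--     for old_c, nodes in items:
--         if classes_per_color[old_c] > 1:
--             changed_nodes += nodes
--     return changed_nodes
-- ===== Notes on version B (the rewrite author's own statement) =====
-- stated objective: alternative
-- what changed: A keeps, per old color, a growing SET of compound colors and tests its size, and recolors by sorting all (compound color, node) pairs and dense-ranking in a scan; B instead builds the inverted partition compound-color -> nodes, counts how many partition cells each old color owns by one pass over the partition's keys, and recolors cell-by-cell over the sorted distinct compound colors.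
import Mathlib
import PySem

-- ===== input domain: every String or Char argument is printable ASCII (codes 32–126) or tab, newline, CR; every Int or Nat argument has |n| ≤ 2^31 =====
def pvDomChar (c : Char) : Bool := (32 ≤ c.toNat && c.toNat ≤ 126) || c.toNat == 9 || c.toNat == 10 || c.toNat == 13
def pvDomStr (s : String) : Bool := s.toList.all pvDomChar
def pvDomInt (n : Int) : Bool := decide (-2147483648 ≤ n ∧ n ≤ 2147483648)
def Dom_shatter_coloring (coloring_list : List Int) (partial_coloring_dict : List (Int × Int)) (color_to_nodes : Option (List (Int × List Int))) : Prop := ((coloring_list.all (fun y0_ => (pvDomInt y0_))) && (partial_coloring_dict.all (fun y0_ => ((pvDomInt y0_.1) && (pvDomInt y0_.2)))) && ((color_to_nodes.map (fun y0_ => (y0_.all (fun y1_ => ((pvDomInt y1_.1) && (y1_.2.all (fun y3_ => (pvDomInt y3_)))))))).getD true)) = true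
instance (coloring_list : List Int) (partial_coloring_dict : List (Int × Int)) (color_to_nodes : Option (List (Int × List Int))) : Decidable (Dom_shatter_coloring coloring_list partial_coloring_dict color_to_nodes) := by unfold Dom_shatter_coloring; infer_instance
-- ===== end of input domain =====

-- B replaces A's per-old-color SET of compound colors by the inverted partition
-- (compound color -> nodes): an old color changed iff it owns >1 cell of that
-- partition, counted over the partition's keys. Both Pythons also recolor
-- `coloring_list` IN PLACE identically — that side effect is not part of the
-- return value, which is all the ports model and the equivalence is about.

-- ===== PORT A =====
-- compound color of node n with old color c: (c, pcd[n]) if n in pcd else the 1-tuple (c,)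
def pvCompound (pcd : PySem.Dict Int Int) (n c : Int) : Int × Option Int :=
  match pcd.get? n with
  | some p => (c, some p)
  | none   => (c, none)

-- body of A's first loop: update new_col_types_by_old and (if compute_ctn) color_to_nodes
def pvStepA (pcd : PySem.Dict Int Int) (compute_ctn : Bool)
    (st : PySem.Dict Int (PySem.Set (Int × Option Int)) × PySem.Dict Int (List Int))
    (p : Int × Int) :
    PySem.Dict Int (PySem.Set (Int × Option Int)) × PySem.Dict Int (List Int) :=
  let cc := pvCompound pcd p.1 p.2
  let n0 := if st.1.contains p.2 then st.1 else st.1.insert p.2 PySem.Set.empty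
  let nctbo := n0.modify p.2 PySem.Set.empty (fun s => PySem.Set.add s cc)
  let ctn :=
    if compute_ctn then
      let c0 := if st.2.contains p.2 then st.2 else st.2.insert p.2 []
      c0.modify p.2 [] (fun l => l ++ [p.1])
    else st.2
  (nctbo, ctn)

-- Port of A (return value only; the sorted `new_colors` pass of A only mutates
-- `coloring_list` in place). `new_col_types_by_old[old_color]` is a plain lookup
-- (KeyError when absent — excluded by Pre_): ported as getD with the empty set.
def shatter_coloring (coloring_list : List Int) (partial_coloring_dict : List (Int × Int)) (color_to_nodes : Option (List (Int × List Int))) : List Int :=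
  let pcd := PySem.Dict.ofList partial_coloring_dict
  let compute_ctn := color_to_nodes.isNone
  let ctn0 : PySem.Dict Int (List Int) :=
    match color_to_nodes with
    | none => PySem.Dict.empty
    | some l => PySem.Dict.ofList l
  let st := (PySem.List.enumerate coloring_list 0).foldl (pvStepA pcd compute_ctn) (PySem.Dict.empty, ctn0)
  st.2.items.foldl
    (fun changed q =>
      if 1 < PySem.Set.len (st.1.getD q.1 PySem.Set.empty) then changed ++ q.2 else changed) []

-- ===== PORT B =====
-- body of B's single pass: refined.setdefault(cc, []).append(n) and, when
-- color_to_nodes is None, groups.setdefault(old_c, []).append(n)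
def pvStepB (pcd : PySem.Dict Int Int) (compute : Bool)
    (st : PySem.Dict (Int × Option Int) (List Int) × PySem.Dict Int (List Int))
    (p : Int × Int) :
    PySem.Dict (Int × Option Int) (List Int) × PySem.Dict Int (List Int) :=
  (st.1.modify (pvCompound pcd p.1 p.2) [] (fun l => l ++ [p.1]),
   if compute then st.2.modify p.2 [] (fun l => l ++ [p.1]) else st.2)

-- Port of B (return value only; Source B's sorted-recolor pass only mutates
-- coloring_list in place, identically to A's). `classes_per_color[old_c]` is a
-- plain lookup (KeyError when absent — excluded by Pre_): ported as getD 0.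
def shatter_coloring_alt (coloring_list : List Int) (partial_coloring_dict : List (Int × Int)) (color_to_nodes : Option (List (Int × List Int))) : List Int :=
  let pcd := PySem.Dict.ofList partial_coloring_dict
  let st := (PySem.List.enumerate coloring_list 0).foldl (pvStepB pcd color_to_nodes.isNone) (PySem.Dict.empty, PySem.Dict.empty)
  let cpc := st.1.keys.foldl (fun m cc => m.modify cc.1 0 (fun k => k + 1)) (PySem.Dict.empty : PySem.Dict Int Int)
  let items := match color_to_nodes with
    | none => st.2.items
    | some l => (PySem.Dict.ofList l).items
  items.foldl (fun changed q => if 1 < cpc.getD q.1 0 then changed ++ q.2 else changed) []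

-- ===== PRECONDITION & SPEC =====
-- Pre_ excludes only inputs where a provided color_to_nodes has a key that is not a
-- color of any node: there A (and B) raise KeyError on the final lookup.
def Pre_shatter_coloring (coloring_list : List Int) (partial_coloring_dict : List (Int × Int)) (color_to_nodes : Option (List (Int × List Int))) : Prop :=
  ∀ p ∈ color_to_nodes.getD [], p.1 ∈ coloring_list
instance (coloring_list : List Int) (partial_coloring_dict : List (Int × Int)) (color_to_nodes : Option (List (Int × List Int))) : Decidable (Pre_shatter_coloring coloring_list partial_coloring_dict color_to_nodes) := by unfold Pre_shatter_coloring; infer_instance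

def pvWitness_shatter_coloring : List Int × (List (Int × Int)) × (Option (List (Int × List Int))) :=
  ([0, 0, 1], [(0, 5)], some [(0, [0, 1]), (1, [2])])

def Spec_shatter_coloring (coloring_list : List Int) (partial_coloring_dict : List (Int × Int)) (color_to_nodes : Option (List (Int × List Int))) (out : List Int) : Prop := out = shatter_coloring_alt coloring_list partial_coloring_dict color_to_nodes
instance (coloring_list : List Int) (partial_coloring_dict : List (Int × Int)) (color_to_nodes : Option (List (Int × List Int))) (out : List Int) : Decidable (Spec_shatter_coloring coloring_list partial_coloring_dict color_to_nodes out) := by unfold Spec_shatter_coloring; infer_instance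

-- ===== CLAIM (what is proved, stated in full; the proofs are below) =====
def Claim_equal_shatter_coloring : Prop := ∀ (coloring_list : List Int) (partial_coloring_dict : List (Int × Int)) (color_to_nodes : Option (List (Int × List Int))), Dom_shatter_coloring coloring_list partial_coloring_dict color_to_nodes → Pre_shatter_coloring coloring_list partial_coloring_dict color_to_nodes → Spec_shatter_coloring coloring_list partial_coloring_dict color_to_nodes (shatter_coloring coloring_list partial_coloring_dict color_to_nodes)

-- ===== LEMMAS AND PROOFS =====

theorem pv_compound_fst (pcd : PySem.Dict Int Int) (n c : Int) : (pvCompound pcd n c).1 = c := by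
  unfold pvCompound
  cases pcd.get? n <;> rfl

-- dedup commutes with filter
theorem pv_ofList_filter {α : Type} [BEq α] [LawfulBEq α] (xs : List α) (q : α → Bool) :
    PySem.Set.ofList (xs.filter q) = (PySem.Set.ofList xs).filter q := by
  induction xs using List.reverseRecOn with
  | nil => rfl
  | append_singleton xs x ih =>
      rw [List.filter_append, PySem.Set.ofList_append_singleton, PySem.Set.add_eq_ite]
      by_cases hq : q x = true
      · have hfx : List.filter q [x] = [x] := by simp [hq]
        rw [hfx, PySem.Set.ofList_append_singleton, ih, PySem.Set.add_eq_ite]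
        by_cases hm : x ∈ PySem.Set.ofList xs
        · rw [if_pos (List.mem_filter.2 ⟨hm, hq⟩), if_pos hm]
        · rw [if_neg (fun h => hm (List.mem_filter.1 h).1), if_neg hm,
            List.filter_append, hfx]
      · have hfx : List.filter q [x] = [] := by simp [hq]
        rw [hfx, List.append_nil, ih]
        by_cases hm : x ∈ PySem.Set.ofList xs
        · rw [if_pos hm]
        · rw [if_neg hm, List.filter_append, hfx, List.append_nil]

-- projections of B's fold
theorem pv_B_fst (pcd : PySem.Dict Int Int) (b : Bool) (L : List (Int × Int))
    (st : PySem.Dict (Int × Option Int) (List Int) × PySem.Dict Int (List Int)) :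
    (L.foldl (pvStepB pcd b) st).1 =
      L.foldl (fun d p => d.modify (pvCompound pcd p.1 p.2) [] (fun l => l ++ [p.1])) st.1 := by
  induction L generalizing st with
  | nil => rfl
  | cons p L ih => rw [List.foldl_cons, List.foldl_cons, ih]; rfl

theorem pv_B_snd_true (pcd : PySem.Dict Int Int) (L : List (Int × Int))
    (st : PySem.Dict (Int × Option Int) (List Int) × PySem.Dict Int (List Int)) :
    (L.foldl (pvStepB pcd true) st).2 =
      L.foldl (fun d p => d.modify p.2 [] (fun l => l ++ [p.1])) st.2 := by
  induction L generalizing st with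
  | nil => rfl
  | cons p L ih => rw [List.foldl_cons, List.foldl_cons, ih]; rfl

-- keys of B's refined partition: the distinct compound colors in first-seen order
theorem pv_B_keys (pcd : PySem.Dict Int Int) (L : List (Int × Int)) :
    (L.foldl (fun d p => d.modify (pvCompound pcd p.1 p.2) [] (fun l => l ++ [p.1]))
      (PySem.Dict.empty : PySem.Dict (Int × Option Int) (List Int))).keys =
      PySem.Set.ofList (L.map (fun p => pvCompound pcd p.1 p.2)) := by
  have h := PySem.Dict.keys_foldl_modify_key L (fun p => pvCompound pcd p.1 p.2)
    ([] : List Int) (fun _ p l => l ++ [p.1]) PySem.Dict.empty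
  simpa [PySem.Dict.keys_empty, PySem.Set.update_nil_left] using h

-- B's classes_per_color: counts of first components over a key list
theorem pv_cpc_getD (K : List (Int × Option Int)) (c : Int) :
    (K.foldl (fun m cc => m.modify cc.1 0 (fun k => k + 1))
        (PySem.Dict.empty : PySem.Dict Int Int)).getD c 0 =
      ((K.map (·.1)).count c : Int) := by
  have h : K.foldl (fun m cc => m.modify cc.1 0 (fun k => k + 1))
        (PySem.Dict.empty : PySem.Dict Int Int)
      = (K.map (·.1)).foldl (fun m x => m.modify x 0 (fun k => k + 1)) PySem.Dict.empty :=
    (List.foldl_map (f := fun cc : Int × Option Int => cc.1)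
      (g := fun (m : PySem.Dict Int Int) x => m.modify x 0 (fun k => k + 1))
      (l := K) (init := PySem.Dict.empty)).symm
  rw [h, PySem.Dict.getD_foldl_modify_add_one, PySem.Dict.getD_empty, zero_add]

-- B's groups: values and keys
theorem pv_B_groups_getD (L : List (Int × Int)) (c : Int) :
    (L.foldl (fun d p => d.modify p.2 [] (fun l => l ++ [p.1]))
      (PySem.Dict.empty : PySem.Dict Int (List Int))).getD c [] =
      (L.filter (fun p => decide (p.2 = c))).map (·.1) := by
  have h : L.foldl (fun d p => d.modify p.2 [] (fun l => l ++ [p.1]))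
        (PySem.Dict.empty : PySem.Dict Int (List Int))
      = (L.map (fun p => (p.2, p.1))).foldl (fun d q => d.modify q.1 [] (fun l => l ++ [q.2]))
          PySem.Dict.empty :=
    (List.foldl_map (f := fun p : Int × Int => (p.2, p.1))
      (g := fun (d : PySem.Dict Int (List Int)) q => d.modify q.1 [] (fun l => l ++ [q.2]))
      (l := L) (init := PySem.Dict.empty)).symm
  rw [h, PySem.Dict.getD_foldl_modify_append, PySem.Dict.getD_empty, List.nil_append,
    List.filter_map, List.map_map]
  simp only [Function.comp_def]
  congr 1

theorem pv_B_groups_keys (L : List (Int × Int)) :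
    (L.foldl (fun d p => d.modify p.2 [] (fun l => l ++ [p.1]))
      (PySem.Dict.empty : PySem.Dict Int (List Int))).keys =
      PySem.Set.ofList (L.map (·.2)) := by
  have h := PySem.Dict.keys_foldl_modify_key L (fun p => p.2) ([] : List Int)
    (fun _ p l => l ++ [p.1]) PySem.Dict.empty
  simpa [PySem.Dict.keys_empty, PySem.Set.update_nil_left] using h

-- A's per-color set of compound colors has the same size as the number of
-- partition cells B counts for that color
theorem pv_len_count (pcd : PySem.Dict Int Int) (L : List (Int × Int)) (c : Int) :
    PySem.Set.len (PySem.Set.ofList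
        ((L.filter (fun p => decide (p.2 = c))).map (fun p => pvCompound pcd p.1 p.2))) =
      (((PySem.Set.ofList (L.map (fun p => pvCompound pcd p.1 p.2))).map (·.1)).count c : Int) := by
  have h1 : (L.filter (fun p => decide (p.2 = c))).map (fun p => pvCompound pcd p.1 p.2)
      = (L.map (fun p => pvCompound pcd p.1 p.2)).filter (fun q => q.1 == c) := by
    rw [List.filter_map]
    congr 1
    apply List.filter_congr
    intro p _
    simp only [Function.comp_def, pv_compound_fst]
    by_cases hp : p.2 = c <;> simp [hp]
  rw [h1, pv_ofList_filter, List.count_eq_countP, List.countP_map,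
    List.countP_eq_length_filter]
  simp [PySem.Set.len, Function.comp_def]

-- ===== below: A-side characterizations (kept from the A port's structure) =====

-- keys through `d[k] = f(d.get(k, d0))`
theorem pv_keys_modify_add {ν : Type} (d : PySem.Dict Int ν) (k : Int) (d0 : ν) (f : ν → ν) :
    (d.modify k d0 f).keys = PySem.Set.add d.keys k := by
  by_cases h : d.contains k = true
  · rw [PySem.Dict.keys_modify, PySem.Dict.keys_insert_of_contains _ _ h,
      PySem.Set.add_of_mem ((PySem.Dict.contains_iff_mem_keys _ _).1 h)]
  · have h' : d.contains k = false := by rw [← Bool.not_eq_true]; exact h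
    have hk : k ∉ d.keys := fun hm => h ((PySem.Dict.contains_iff_mem_keys _ _).2 hm)
    rw [PySem.Dict.keys_modify, PySem.Dict.keys_insert_of_not_contains _ _ h',
      PySem.Set.add_of_not_mem hk]

-- keys through A's setdefault-then-append pattern
theorem pv_keys_setdefault_modify {ν : Type} (d : PySem.Dict Int ν) (k : Int) (d0 : ν) (f : ν → ν) :
    ((if d.contains k then d else d.insert k d0).modify k d0 f).keys = PySem.Set.add d.keys k := by
  by_cases h : d.contains k = true
  · rw [if_pos h, pv_keys_modify_add]
  · have h' : d.contains k = false := by rw [← Bool.not_eq_true]; exact h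
    have hk : k ∉ d.keys := fun hm => h ((PySem.Dict.contains_iff_mem_keys _ _).2 hm)
    rw [if_neg h, pv_keys_modify_add, PySem.Dict.keys_insert_of_not_contains _ _ h',
      PySem.Set.add_of_not_mem hk, PySem.Set.add_of_mem (by simp)]

-- lookups through A's setdefault-then-modify pattern
theorem pv_getD_setdefault_modify {ν : Type} (d : PySem.Dict Int ν) (k c : Int) (d0 : ν) (f : ν → ν) :
    ((if d.contains k then d else d.insert k d0).modify k d0 f).getD c d0 =
      if c = k then f (d.getD k d0) else d.getD c d0 := by
  by_cases h : d.contains k = true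
  · rw [if_pos h, PySem.Dict.getD_modify]
  · have h' : d.contains k = false := by rw [← Bool.not_eq_true]; exact h
    rw [if_neg h, PySem.Dict.getD_modify]
    by_cases hc : c = k
    · rw [if_pos hc, if_pos hc, PySem.Dict.getD_insert, if_pos rfl,
        PySem.Dict.getD_of_not_contains _ _ h']
    · rw [if_neg hc, if_neg hc, PySem.Dict.getD_insert, if_neg hc]

-- A's second fold component is untouched when compute_ctn is false
theorem pv_A_ctn_const (pcd : PySem.Dict Int Int) (L : List (Int × Int))
    (st0 : PySem.Dict Int (PySem.Set (Int × Option Int)) × PySem.Dict Int (List Int)) :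
    (L.foldl (pvStepA pcd false) st0).2 = st0.2 := by
  induction L generalizing st0 with
  | nil => rfl
  | cons p L ih => rw [List.foldl_cons, ih]; rfl

-- A's new_col_types_by_old: the set of compound colors of the nodes of color c
theorem pv_A_nctbo (pcd : PySem.Dict Int Int) (flag : Bool) (ctn0 : PySem.Dict Int (List Int))
    (L : List (Int × Int)) (c : Int) :
    ((L.foldl (pvStepA pcd flag) (PySem.Dict.empty, ctn0)).1).getD c PySem.Set.empty =
      PySem.Set.ofList ((L.filter (fun p => decide (p.2 = c))).map (fun p => pvCompound pcd p.1 p.2)) := by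
  induction L using List.reverseRecOn with
  | nil => simp [PySem.Dict.getD_empty]
  | append_singleton L p ih =>
      rw [List.foldl_append, List.foldl_cons, List.foldl_nil]
      have hfst : ((pvStepA pcd flag (L.foldl (pvStepA pcd flag) (PySem.Dict.empty, ctn0)) p).1) =
          (if (L.foldl (pvStepA pcd flag) (PySem.Dict.empty, ctn0)).1.contains p.2 then
            (L.foldl (pvStepA pcd flag) (PySem.Dict.empty, ctn0)).1
           else (L.foldl (pvStepA pcd flag) (PySem.Dict.empty, ctn0)).1.insert p.2 PySem.Set.empty).modify p.2
            PySem.Set.empty (fun s => PySem.Set.add s (pvCompound pcd p.1 p.2)) := rfl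
      rw [hfst, pv_getD_setdefault_modify]
      by_cases hc : p.2 = c
      · rw [if_pos hc.symm, List.filter_append]
        have : List.filter (fun p => decide (p.2 = c)) [p] = [p] := by simp [hc]
        rw [this, List.map_append, List.map_cons, List.map_nil,
          PySem.Set.ofList_append_singleton, ← ih, hc]
      · rw [if_neg (fun h => hc h.symm), List.filter_append]
        have : List.filter (fun p => decide (p.2 = c)) [p] = [] := by simp [hc]
        rw [this, List.append_nil, ih]

-- A's built color_to_nodes (compute_ctn = true): values and keys
theorem pv_A_ctn (pcd : PySem.Dict Int Int) (L : List (Int × Int)) :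
    (∀ c : Int,
      ((L.foldl (pvStepA pcd true) (PySem.Dict.empty, PySem.Dict.empty)).2).getD c [] =
        (L.filter (fun p => decide (p.2 = c))).map (·.1)) ∧
    ((L.foldl (pvStepA pcd true) (PySem.Dict.empty, PySem.Dict.empty)).2).keys =
      PySem.Set.ofList (L.map (·.2)) := by
  induction L using List.reverseRecOn with
  | nil =>
      constructor
      · intro c; simp [PySem.Dict.getD_empty]
      · rfl
  | append_singleton L p ih =>
      obtain ⟨ihv, ihk⟩ := ih
      rw [List.foldl_append, List.foldl_cons, List.foldl_nil]
      have hsnd : ((pvStepA pcd true (L.foldl (pvStepA pcd true) (PySem.Dict.empty, PySem.Dict.empty)) p).2) =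
          (if (L.foldl (pvStepA pcd true) (PySem.Dict.empty, PySem.Dict.empty)).2.contains p.2 then
            (L.foldl (pvStepA pcd true) (PySem.Dict.empty, PySem.Dict.empty)).2
           else (L.foldl (pvStepA pcd true) (PySem.Dict.empty, PySem.Dict.empty)).2.insert p.2 []).modify p.2
            [] (fun l => l ++ [p.1]) := rfl
      constructor
      · intro c
        rw [hsnd, pv_getD_setdefault_modify]
        by_cases hc : p.2 = c
        · rw [if_pos hc.symm, List.filter_append]
          have : List.filter (fun p => decide (p.2 = c)) [p] = [p] := by simp [hc]
          rw [this, List.map_append, List.map_cons, List.map_nil, ← ihv c, hc]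
        · rw [if_neg (fun h => hc h.symm), List.filter_append]
          have : List.filter (fun p => decide (p.2 = c)) [p] = [] := by simp [hc]
          rw [this, List.append_nil, ihv]
      · rw [hsnd, pv_keys_setdefault_modify, ihk, List.map_append, List.map_cons, List.map_nil,
          PySem.Set.ofList_append_singleton]

-- ===== VERDICT (by name: the statement is the Claim_ definition above) =====
theorem shatter_coloring_spec : Claim_equal_shatter_coloring := by
  intro coloring_list partial_coloring_dict color_to_nodes _hdom _hpre
  unfold Spec_shatter_coloring
  cases color_to_nodes with
  | none =>
      simp only [shatter_coloring, shatter_coloring_alt, Option.isNone_none]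
      have hitems :
          ((PySem.List.enumerate coloring_list 0).foldl
            (pvStepA (PySem.Dict.ofList partial_coloring_dict) true)
            (PySem.Dict.empty, PySem.Dict.empty)).2.items =
          ((PySem.List.enumerate coloring_list 0).foldl
            (pvStepB (PySem.Dict.ofList partial_coloring_dict) true)
            (PySem.Dict.empty, PySem.Dict.empty)).2.items := by
        obtain ⟨hAv, hAk⟩ := pv_A_ctn (PySem.Dict.ofList partial_coloring_dict)
          (PySem.List.enumerate coloring_list 0)
        rw [pv_B_snd_true,
            PySem.Dict.items_eq_map_keys _ (by rw [hAk]; exact PySem.Set.nodup_ofList _) ([] : List Int),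
            PySem.Dict.items_eq_map_keys _ (by rw [pv_B_groups_keys]; exact PySem.Set.nodup_ofList _) ([] : List Int),
            hAk, pv_B_groups_keys]
        apply List.map_congr_left
        intro k _
        rw [hAv k, pv_B_groups_getD]
      rw [hitems]
      apply PySem.List.foldl_congr_mem
      intro acc q _
      simp only [pv_A_nctbo, pv_len_count, pv_B_fst, pv_B_keys, pv_cpc_getD]
  | some l =>
      simp only [shatter_coloring, shatter_coloring_alt, Option.isNone_some]
      rw [pv_A_ctn_const]
      apply PySem.List.foldl_congr_mem
      intro acc q _
      simp only [pv_A_nctbo, pv_len_count, pv_B_fst, pv_B_keys, pv_cpc_getD]
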